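-- pv_equiv track=rewrite | github.com/AesmaDiv/PumpTest | AesmaLib/ArrayFuncs.py | remove_lesser
-- ===== SOURCE A (Python) =====
-- def remove_lesser(array: list, value, is_including=False):
--     result, index = array.copy(), -1
--     if len(result):
--         indices = [i for i, v in enumerate(result) if v < value]
--         if indices:
--             index = max(indices)
--             index += 2 if is_including else 1
--             del result[:index]
--     return result, index
-- ===== SOURCE B (Python) =====
-- def remove_lesser(array: list, value, is_including=False):
--     # right-to-left scan: stop at the last (rightmost) element below value
--     for i in range(len(array) - 1, -1, -1):
--         if array[i] < value:
--             index = i + (2 if is_including else 1)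
--             return array[index:], index
--     return array.copy(), -1
-- ===== Notes on version B (the rewrite author's own statement) =====
-- stated objective: alternative
-- what changed: Replaces A's forward comprehension of all qualifying indices plus max() with a right-to-left scan that returns at the first (rightmost) element below value, slicing instead of deleting a prefix.
import Mathlib
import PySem

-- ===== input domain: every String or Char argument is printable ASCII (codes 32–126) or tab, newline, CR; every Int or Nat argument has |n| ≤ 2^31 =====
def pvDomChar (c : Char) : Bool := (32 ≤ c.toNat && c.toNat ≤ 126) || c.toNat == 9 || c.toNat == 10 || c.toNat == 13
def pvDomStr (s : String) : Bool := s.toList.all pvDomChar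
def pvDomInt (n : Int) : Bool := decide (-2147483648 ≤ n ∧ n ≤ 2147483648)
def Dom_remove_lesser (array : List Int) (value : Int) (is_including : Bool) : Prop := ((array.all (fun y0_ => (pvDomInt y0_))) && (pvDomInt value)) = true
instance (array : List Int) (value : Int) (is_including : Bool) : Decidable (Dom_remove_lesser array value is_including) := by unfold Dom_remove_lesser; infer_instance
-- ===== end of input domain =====

-- B replaces A's full forward scan + max over all qualifying indices with a right-to-left
-- scan that stops at the first (i.e. rightmost) element below value: alternative decomposition,
-- same worst-case cost, early exit in the common case. Neither version mutates its argument.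

-- ===== PORT A =====
-- forward comprehension of all qualifying indices, then max
def remove_lesser (array : List Int) (value : Int) (is_including : Bool) : List Int × Int :=
  let result := array
  let index : Int := -1
  if result.length ≠ 0 then
    let indices : List Int :=
      (PySem.List.enumerate result).filterMap (fun iv => if iv.2 < value then some iv.1 else none)
    if indices ≠ [] then
      let m := (PySem.List.max? indices id).getD 0   -- guarded: indices ≠ [], so max? is some
      let index := m + (if is_including then 2 else 1)
      (PySem.List.slice result (some index) none, index)
    else (result, index)
  else (result, index)

-- ===== PORT B =====
-- right-to-left scan: fuel k means "next position to look at is k-1"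
def removeLesserScan (array : List Int) (value : Int) (is_including : Bool) : Nat → List Int × Int
  | 0 => (array, -1)
  | (i+1) =>
    if PySem.List.pyGetD array (i : Int) 0 < value then
      let index : Int := (i : Int) + (if is_including then 2 else 1)
      (PySem.List.slice array (some index) none, index)
    else removeLesserScan array value is_including i

def remove_lesser_alt (array : List Int) (value : Int) (is_including : Bool) : List Int × Int :=
  removeLesserScan array value is_including array.length

-- ===== PRECONDITION & SPEC =====
def Spec_remove_lesser (array : List Int) (value : Int) (is_including : Bool) (out : List Int × Int) : Prop := out = remove_lesser_alt array value is_including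
instance (array : List Int) (value : Int) (is_including : Bool) (out : List Int × Int) : Decidable (Spec_remove_lesser array value is_including out) := by unfold Spec_remove_lesser; infer_instance

-- ===== CLAIM (what is proved, stated in full; the proofs are below) =====
def Claim_equal_remove_lesser : Prop := ∀ (array : List Int) (value : Int) (is_including : Bool), Dom_remove_lesser array value is_including → Spec_remove_lesser array value is_including (remove_lesser array value is_including)

-- ===== LEMMAS AND PROOFS =====

-- membership in A's index comprehension
theorem mem_indices_iff (array : List Int) (value x : Int) :
    x ∈ (PySem.List.enumerate array).filterMap (fun iv => if iv.2 < value then some iv.1 else none) ↔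
      ∃ k, ∃ h : k < array.length, x = (k : Int) ∧ array[k] < value := by
  simp only [List.mem_filterMap]
  constructor
  · rintro ⟨iv, hmem, hx⟩
    rw [PySem.List.mem_enumerate_iff] at hmem
    obtain ⟨k, hk, rfl⟩ := hmem
    split at hx
    · exact ⟨k, hk, by simpa using hx.symm, by assumption⟩
    · cases hx
  · rintro ⟨k, hk, rfl, hlt⟩
    refine ⟨((k : Int), array[k]), ?_, by simp [hlt]⟩
    rw [PySem.List.mem_enumerate_iff]
    exact ⟨k, hk, by simp⟩

-- B's scan when no position below the fuel qualifies
theorem scan_none (array : List Int) (value : Int) (inc : Bool) :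
    ∀ k, (∀ i, i < k → ¬ array.getD i 0 < value) →
      removeLesserScan array value inc k = (array, -1) := by
  intro k
  induction k with
  | zero => intro _; rfl
  | succ i ih =>
    intro h
    simp only [removeLesserScan, PySem.List.pyGetD_natCast]
    rw [if_neg (h i (Nat.lt_succ_self i))]
    exact ih (fun j hj => h j (Nat.lt_succ_of_lt hj))

-- B's scan when j is the rightmost qualifying position below the fuel
theorem scan_found (array : List Int) (value : Int) (inc : Bool) :
    ∀ k j, j < k → array.getD j 0 < value →
      (∀ i, j < i → i < k → ¬ array.getD i 0 < value) →
      removeLesserScan array value inc k =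
        (PySem.List.slice array (some ((j : Int) + (if inc then 2 else 1))) none,
         (j : Int) + (if inc then 2 else 1)) := by
  intro k
  induction k with
  | zero => intro j hj; omega
  | succ i ih =>
    intro j hj hq hmax
    simp only [removeLesserScan, PySem.List.pyGetD_natCast]
    by_cases hij : j = i
    · subst hij; rw [if_pos hq]
    · have hji : j < i := by omega
      rw [if_neg (hmax i hji (Nat.lt_succ_self i))]
      exact ih j hji hq (fun x hx hxi => hmax x hx (Nat.lt_succ_of_lt hxi))

-- ===== VERDICT (by name: the statement is the Claim_ definition above) =====
theorem remove_lesser_spec : Claim_equal_remove_lesser := by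
  intro array value inc _
  unfold Spec_remove_lesser remove_lesser remove_lesser_alt
  simp only []
  set indices : List Int :=
    (PySem.List.enumerate array).filterMap (fun iv => if iv.2 < value then some iv.1 else none)
    with hind
  by_cases hlen : array.length ≠ 0
  · rw [if_pos hlen]
    by_cases hne : indices ≠ []
    · rw [if_pos hne]
      obtain ⟨m, hm⟩ : ∃ m, PySem.List.max? indices id = some m := by
        cases hmx : PySem.List.max? indices id with
        | none => exact absurd ((PySem.List.max?_eq_none_iff indices id).mp hmx) hne
        | some m => exact ⟨m, rfl⟩
      have hmem := PySem.List.max?_mem hm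
      rw [hind, mem_indices_iff] at hmem
      obtain ⟨j, hjlt, rfl, hjq⟩ := hmem
      have hjq' : array.getD j 0 < value := by rwa [List.getD_eq_getElem _ _ hjlt]
      have hmax : ∀ i, j < i → i < array.length → ¬ array.getD i 0 < value := by
        intro i hji hilt hq
        have : (i : Int) ∈ indices := by
          rw [hind, mem_indices_iff]
          exact ⟨i, hilt, rfl, by rwa [List.getD_eq_getElem _ _ hilt] at hq⟩
        have := PySem.List.max?_isMax hm _ this
        simp only [id] at this
        omega
      rw [scan_found array value inc array.length j hjlt hjq' hmax, hm]
      rfl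
    · rw [if_neg hne]
      push_neg at hne
      rw [scan_none array value inc array.length]
      intro i hi hq
      have : (i : Int) ∈ indices := by
        rw [hind, mem_indices_iff]
        exact ⟨i, hi, rfl, by rwa [List.getD_eq_getElem _ _ hi] at hq⟩
      rw [hne] at this
      cases this
  · rw [if_neg hlen]
    push_neg at hlen
    rw [scan_none array value inc array.length]
    intro i hi
    omega
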